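-- pv_equiv track=rewrite | github.com/arunavsameer/StartupSaathi | startup_saathi_app/app.py | filter_schemes_by_profile
-- ===== SOURCE A (Python) =====
-- def filter_schemes_by_profile(schemes: list[dict], sector: str, size: str) -> list[dict]:
--     result = []
--     for scheme in schemes:
--         s_match = "all" in scheme.get("sectors", ["all"]) or sector in scheme.get("sectors", ["all"])
--         z_match = "all" in scheme.get("sizes", ["all"]) or size in scheme.get("sizes", ["all"])
--         if s_match and z_match: result.append((2, scheme))
--         elif s_match or z_match: result.append((1, scheme))
--     result.sort(key=lambda x: x[0], reverse=True)
--     return [s for _, s in result]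
-- ===== SOURCE B (Python) =====
-- def _score(scheme: dict, sector: str, size: str) -> int:
--     sectors = scheme.get("sectors", ["all"])
--     sizes = scheme.get("sizes", ["all"])
--     return (("all" in sectors or sector in sectors)
--             + ("all" in sizes or size in sizes))
--
-- def filter_schemes_by_profile(schemes: list[dict], sector: str, size: str) -> list[dict]:
--     return ([s for s in schemes if _score(s, sector, size) == 2]
--             + [s for s in schemes if _score(s, sector, size) == 1])
-- ===== Notes on version B (the rewrite author's own statement) =====
-- stated objective: simpler
-- what changed: B drops A's tag-with-score-then-stable-reverse-sort entirely: it computes a numeric match score per scheme and returns two filter passes (score 2, then score 1) concatenated, which coincides with A's stable sort on keys in {1,2}.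
import Mathlib
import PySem

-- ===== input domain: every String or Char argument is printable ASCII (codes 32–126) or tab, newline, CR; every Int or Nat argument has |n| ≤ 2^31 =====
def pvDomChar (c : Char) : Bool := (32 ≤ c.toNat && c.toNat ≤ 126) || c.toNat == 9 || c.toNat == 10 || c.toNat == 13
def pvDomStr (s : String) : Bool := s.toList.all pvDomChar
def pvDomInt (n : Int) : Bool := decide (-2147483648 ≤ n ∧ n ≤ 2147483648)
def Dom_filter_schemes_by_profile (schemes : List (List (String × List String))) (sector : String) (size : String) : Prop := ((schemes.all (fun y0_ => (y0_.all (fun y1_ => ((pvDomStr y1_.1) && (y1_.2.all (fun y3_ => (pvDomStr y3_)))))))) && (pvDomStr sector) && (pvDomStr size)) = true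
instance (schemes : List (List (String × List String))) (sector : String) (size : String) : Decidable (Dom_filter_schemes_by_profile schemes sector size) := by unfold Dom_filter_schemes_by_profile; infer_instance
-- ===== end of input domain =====

-- B drops A's tag-then-stable-reverse-sort: it scores each scheme numerically and
-- returns two filter passes (score 2, then score 1) concatenated — objective: simpler.

-- ===== PORT A =====
-- Python's scheme.get(key, default) on an association list (first match)
def pyDictGetD (d : List (String × List String)) (k : String) (dflt : List String) : List String :=
  match d.find? (fun p => p.1 == k) with
  | some p => p.2
  | none => dflt

def filter_schemes_by_profile (schemes : List (List (String × List String))) (sector : String) (size : String) : List (List (String × List String)) :=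
  let result : List (Int × List (String × List String)) := schemes.foldl (fun result scheme =>
    let s_match := (pyDictGetD scheme "sectors" ["all"]).contains "all" || (pyDictGetD scheme "sectors" ["all"]).contains sector
    let z_match := (pyDictGetD scheme "sizes" ["all"]).contains "all" || (pyDictGetD scheme "sizes" ["all"]).contains size
    if s_match && z_match then result ++ [((2 : Int), scheme)]
    else if s_match || z_match then result ++ [((1 : Int), scheme)]
    else result) []
  (PySem.List.sorted result (fun x => x.1) true).map (fun x => x.2)

-- ===== PORT B =====
-- B's _score helper: booleans summed as ints, as in the Python
def pvScore (scheme : List (String × List String)) (sector : String) (size : String) : Int :=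
  let sectors := pyDictGetD scheme "sectors" ["all"]
  let sizes := pyDictGetD scheme "sizes" ["all"]
  (if sectors.contains "all" || sectors.contains sector then 1 else 0)
    + (if sizes.contains "all" || sizes.contains size then 1 else 0)

def filter_schemes_by_profile_alt (schemes : List (List (String × List String))) (sector : String) (size : String) : List (List (String × List String)) :=
  schemes.filter (fun s => pvScore s sector size == 2)
    ++ schemes.filter (fun s => pvScore s sector size == 1)

-- ===== PRECONDITION & SPEC =====
def Spec_filter_schemes_by_profile (schemes : List (List (String × List String))) (sector : String) (size : String) (out : List (List (String × List String))) : Prop := out = filter_schemes_by_profile_alt schemes sector size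
instance (schemes : List (List (String × List String))) (sector : String) (size : String) (out : List (List (String × List String))) : Decidable (Spec_filter_schemes_by_profile schemes sector size out) := by unfold Spec_filter_schemes_by_profile; infer_instance

-- ===== CLAIM (what is proved, stated in full; the proofs are below) =====
def Claim_equal_filter_schemes_by_profile : Prop := ∀ (schemes : List (List (String × List String))) (sector : String) (size : String), Dom_filter_schemes_by_profile schemes sector size → Spec_filter_schemes_by_profile schemes sector size (filter_schemes_by_profile schemes sector size)

-- ===== LEMMAS AND PROOFS =====

-- match bits of one scheme
def pvS (sector : String) (scheme : List (String × List String)) : Bool :=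
  (pyDictGetD scheme "sectors" ["all"]).contains "all" || (pyDictGetD scheme "sectors" ["all"]).contains sector
def pvZ (size : String) (scheme : List (String × List String)) : Bool :=
  (pyDictGetD scheme "sizes" ["all"]).contains "all" || (pyDictGetD scheme "sizes" ["all"]).contains size

-- A's per-scheme contribution
def pvTag (sector size : String) (scheme : List (String × List String)) : List (Int × List (String × List String)) :=
  if pvS sector scheme && pvZ size scheme then [((2 : Int), scheme)]
  else if pvS sector scheme || pvZ size scheme then [((1 : Int), scheme)]
  else []

lemma pvScore_eq (scheme : List (String × List String)) (sector size : String) :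
    pvScore scheme sector size
      = (if pvS sector scheme then (1:Int) else 0) + (if pvZ size scheme then (1:Int) else 0) := by
  simp [pvScore, pvS, pvZ]

lemma pvA_foldl (schemes : List (List (String × List String))) (sector size : String)
    (acc : List (Int × List (String × List String))) :
    schemes.foldl (fun result scheme =>
      let s_match := (pyDictGetD scheme "sectors" ["all"]).contains "all" || (pyDictGetD scheme "sectors" ["all"]).contains sector
      let z_match := (pyDictGetD scheme "sizes" ["all"]).contains "all" || (pyDictGetD scheme "sizes" ["all"]).contains size
      if s_match && z_match then result ++ [((2 : Int), scheme)]
      else if s_match || z_match then result ++ [((1 : Int), scheme)]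
      else result) acc = acc ++ schemes.flatMap (pvTag sector size) := by
  have h : (fun (result : List (Int × List (String × List String))) scheme =>
      let s_match := (pyDictGetD scheme "sectors" ["all"]).contains "all" || (pyDictGetD scheme "sectors" ["all"]).contains sector
      let z_match := (pyDictGetD scheme "sizes" ["all"]).contains "all" || (pyDictGetD scheme "sizes" ["all"]).contains size
      if s_match && z_match then result ++ [((2 : Int), scheme)]
      else if s_match || z_match then result ++ [((1 : Int), scheme)]
      else result) = (fun result scheme => result ++ pvTag sector size scheme) := by
    funext result scheme
    simp only [pvTag, pvS, pvZ]
    split_ifs <;> simp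
  rw [h, PySem.List.foldl_append_eq_flatMap]

-- inserting into a "twos ++ ones" list keeps the bucket shape (stability of A's sort)
lemma pvInsert_two {α : Type} (A B : List (Int × α)) (x : Int × α)
    (hA : ∀ a ∈ A, a.1 = 2) (hB : ∀ b ∈ B, b.1 = 1) (hx : x.1 = 2) :
    PySem.List.insertBy (fun a b => decide (b.1 < a.1)) x (A ++ B) = A ++ x :: B := by
  induction A with
  | nil =>
    cases B with
    | nil => simp [PySem.List.insertBy]
    | cons b t =>
      have hb := hB b (by simp)
      simp [PySem.List.insertBy, hb, hx]
  | cons a t ih =>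
    have ha := hA a (by simp)
    simp only [List.cons_append, PySem.List.insertBy, ha, hx]
    norm_num
    exact ih (fun a ha' => hA a (by simp [ha']))

lemma pvInsert_one {α : Type} (A B : List (Int × α)) (x : Int × α)
    (hA : ∀ a ∈ A, a.1 = 2) (hB : ∀ b ∈ B, b.1 = 1) (hx : x.1 = 1) :
    PySem.List.insertBy (fun a b => decide (b.1 < a.1)) x (A ++ B) = A ++ B ++ [x] := by
  induction A with
  | nil =>
    simp only [List.nil_append]
    induction B with
    | nil => simp [PySem.List.insertBy]
    | cons b t ihb =>
      have hb := hB b (by simp)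
      simp only [PySem.List.insertBy, hb, hx]
      norm_num
      have := ihb (fun b hb' => hB b (by simp [hb']))
      simpa using this
  | cons a t ih =>
    have ha := hA a (by simp)
    simp only [List.cons_append, PySem.List.insertBy, ha, hx]
    norm_num
    have := ih (fun a ha' => hA a (by simp [ha']))
    simpa [List.append_assoc] using this

-- A's stable reverse sort on keys in {1,2} = filter-2 ++ filter-1
lemma pvBucket {α : Type} (l : List (Int × α)) (h : ∀ p ∈ l, p.1 = 1 ∨ p.1 = 2) :
    PySem.List.sorted l (fun x => x.1) true
      = l.filter (fun p => p.1 == 2) ++ l.filter (fun p => p.1 == 1) := by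
  rw [PySem.List.sorted_rev_eq_foldl_insertBy]
  suffices H : ∀ (l : List (Int × α)) (A B : List (Int × α)),
      (∀ p ∈ l, p.1 = 1 ∨ p.1 = 2) → (∀ a ∈ A, a.1 = 2) → (∀ b ∈ B, b.1 = 1) →
      l.foldl (fun acc x => PySem.List.insertBy (fun a b => decide (b.1 < a.1)) x acc) (A ++ B)
        = (A ++ l.filter (fun p => p.1 == 2)) ++ (B ++ l.filter (fun p => p.1 == 1)) by
    have := H l [] [] h (by simp) (by simp)
    simpa using this
  intro l A B hl hA hB
  induction l generalizing A B with
  | nil => simp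
  | cons x t ih =>
    have hlt : ∀ p ∈ t, p.1 = 1 ∨ p.1 = 2 := fun p hp => hl p (by simp [hp])
    rcases hl x (by simp) with hx1 | hx2
    · rw [List.foldl_cons, pvInsert_one A B x hA hB hx1]
      have hB' : ∀ b ∈ B ++ [x], b.1 = 1 := by
        intro b hb
        rcases List.mem_append.mp hb with h' | h'
        · exact hB b h'
        · simp at h'; simp [h', hx1]
      have e : A ++ B ++ [x] = A ++ (B ++ [x]) := by simp
      rw [e, ih A (B ++ [x]) hlt hA hB']
      simp [hx1, List.append_assoc]
    · rw [List.foldl_cons, pvInsert_two A B x hA hB hx2]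
      have hA' : ∀ a ∈ A ++ [x], a.1 = 2 := by
        intro a ha
        rcases List.mem_append.mp ha with h' | h'
        · exact hA a h'
        · simp at h'; simp [h', hx2]
      have e : A ++ x :: B = (A ++ [x]) ++ B := by simp
      rw [e, ih (A ++ [x]) B hlt hA' hB]
      simp [hx2, List.append_assoc]

lemma pvTag_keys (schemes : List (List (String × List String))) (sector size : String) :
    ∀ p ∈ schemes.flatMap (pvTag sector size), p.1 = 1 ∨ p.1 = 2 := by
  intro p hp
  rcases List.mem_flatMap.mp hp with ⟨s, _, hps⟩
  unfold pvTag at hps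
  split_ifs at hps <;> simp_all

lemma pvFilter2 (schemes : List (List (String × List String))) (sector size : String) :
    ((schemes.flatMap (pvTag sector size)).filter (fun p => p.1 == 2)).map (fun x => x.2)
      = schemes.filter (fun s => pvScore s sector size == 2) := by
  induction schemes with
  | nil => simp
  | cons s t ih =>
    simp only [List.flatMap_cons, List.filter_append, List.map_append, ih, List.filter_cons]
    rw [pvScore_eq]
    unfold pvTag
    split_ifs <;> simp_all

lemma pvFilter1 (schemes : List (List (String × List String))) (sector size : String) :
    ((schemes.flatMap (pvTag sector size)).filter (fun p => p.1 == 1)).map (fun x => x.2)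
      = schemes.filter (fun s => pvScore s sector size == 1) := by
  induction schemes with
  | nil => simp
  | cons s t ih =>
    simp only [List.flatMap_cons, List.filter_append, List.map_append, ih, List.filter_cons]
    rw [pvScore_eq]
    unfold pvTag
    split_ifs <;> simp_all

-- ===== VERDICT (by name: the statement is the Claim_ definition above) =====
theorem filter_schemes_by_profile_spec : Claim_equal_filter_schemes_by_profile := by
  intro schemes sector size _
  unfold Spec_filter_schemes_by_profile filter_schemes_by_profile filter_schemes_by_profile_alt
  simp only [pvA_foldl schemes sector size []]
  rw [List.nil_append, pvBucket _ (pvTag_keys schemes sector size), List.map_append,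
      pvFilter2, pvFilter1]
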